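-- pv_equiv track=rewrite | github.com/dasha2000vas/python_gym | while_loop/classwork/squares_of_natural_numbers.py | get_squares_of_natural_numbers
-- ===== SOURCE A (Python) =====
-- def get_squares_of_natural_numbers(n: int) -> list[int]:
--     """
--     Finds all squares of natural numbers up to n.
--
--     Args:
--         n (int): Max number (>0).
--
--     Returns:
--         squares (list[int]): List of squares of natural numbers.
--     """
--     if not isinstance(n, int):
--         raise ValueError("n must be integer")
--     if n <= 0:
--         raise ValueError("n must be natural number")
--     squares = []
--     num = 1
--     while (square := num ** 2 ) <= n:
--         squares.append(square)
--         num += 1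
--     return squares
-- ===== SOURCE B (Python) =====
-- import math
--
--
-- def get_squares_of_natural_numbers(n: int) -> list[int]:
--     if not isinstance(n, int):
--         raise ValueError("n must be integer")
--     if n <= 0:
--         raise ValueError("n must be natural number")
--     limit = math.isqrt(n)
--     return [k * k for k in range(1, limit + 1)]
-- ===== Notes on version B (the rewrite author's own statement) =====
-- stated objective: idiomatic
-- what changed: Replaces the while-loop's per-step square-and-compare termination test with a closed-form bound math.isqrt(n) computed once, then a single fixed-range comprehension over range(1, isqrt(n)+1).
import Mathlib
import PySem

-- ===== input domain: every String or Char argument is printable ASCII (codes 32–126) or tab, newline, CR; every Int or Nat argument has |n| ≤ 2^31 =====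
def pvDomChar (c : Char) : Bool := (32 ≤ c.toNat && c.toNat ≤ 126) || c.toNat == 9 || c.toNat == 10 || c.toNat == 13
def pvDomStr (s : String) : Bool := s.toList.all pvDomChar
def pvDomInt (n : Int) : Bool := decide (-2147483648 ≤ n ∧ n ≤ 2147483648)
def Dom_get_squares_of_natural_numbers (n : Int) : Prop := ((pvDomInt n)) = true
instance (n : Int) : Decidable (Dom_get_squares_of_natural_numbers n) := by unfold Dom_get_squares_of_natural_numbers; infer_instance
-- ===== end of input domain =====

-- B replaces A's while-loop (square and compare each step) with the closed-form
-- bound isqrt(n) computed once and a single map over range(1, isqrt(n)+1).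
-- Equivalence of the RETURN value on n > 0 (A raises ValueError for n ≤ 0).

-- ===== PORT A =====
-- the while loop: num starts at 1; while num**2 <= n, append and increment
def pvLoopA (n num : Int) (acc : List Int) (h : 1 ≤ num) : List Int :=
  if hc : num * num ≤ n then
    pvLoopA n (num + 1) (acc ++ [num * num]) (by omega)
  else acc
termination_by (n + 1 - num).toNat
decreasing_by
  have hmul : num ≤ num * num := le_mul_of_one_le_left (by omega) h
  omega

def get_squares_of_natural_numbers (n : Int) : List Int :=
  pvLoopA n 1 [] (le_refl 1)

-- ===== PORT B =====
-- limit = math.isqrt(n); [k*k for k in range(1, limit+1)]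
def get_squares_of_natural_numbers_alt (n : Int) : List Int :=
  let limit : Int := (Nat.sqrt n.toNat : Int)
  (PySem.List.pyRange 1 (limit + 1) 1).map (fun k => k * k)

-- ===== PRECONDITION & SPEC =====
-- A raises ValueError("n must be natural number") when n ≤ 0; excluded.
def Pre_get_squares_of_natural_numbers (n : Int) : Prop := 0 < n
instance (n : Int) : Decidable (Pre_get_squares_of_natural_numbers n) := by
  unfold Pre_get_squares_of_natural_numbers; infer_instance

def pvWitness_get_squares_of_natural_numbers : Int := 10

def Spec_get_squares_of_natural_numbers (n : Int) (out : List Int) : Prop :=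
  out = get_squares_of_natural_numbers_alt n
instance (n : Int) (out : List Int) : Decidable (Spec_get_squares_of_natural_numbers n out) := by
  unfold Spec_get_squares_of_natural_numbers; infer_instance

-- ===== CLAIM (what is proved, stated in full; the proofs are below) =====
def Claim_equal_get_squares_of_natural_numbers : Prop :=
  ∀ (n : Int), Dom_get_squares_of_natural_numbers n →
    Pre_get_squares_of_natural_numbers n →
    Spec_get_squares_of_natural_numbers n (get_squares_of_natural_numbers n)

-- ===== LEMMAS AND PROOFS =====

-- num*num ≤ n ↔ num ≤ isqrt(n), for 1 ≤ num and 0 < n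
theorem pv_sq_le_iff (n num : Int) (hnum : 1 ≤ num) (hn : 0 < n) :
    num * num ≤ n ↔ num ≤ (Nat.sqrt n.toNat : Int) := by
  have hl : num.toNat * num.toNat ≤ n.toNat ↔ num.toNat ≤ Nat.sqrt n.toNat :=
    (Nat.le_sqrt).symm
  constructor
  · intro h
    have h1 : num.toNat * num.toNat ≤ n.toNat := by
      have := Int.toNat_le_toNat h
      calc num.toNat * num.toNat = (num * num).toNat := by
            rw [Int.toNat_mul (by omega) (by omega)]
        _ ≤ n.toNat := Int.toNat_le_toNat h
    have := hl.mp h1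
    omega
  · intro h
    have h1 : num.toNat ≤ Nat.sqrt n.toNat := by omega
    have h2 := hl.mpr h1
    have h3 : (num.toNat * num.toNat : Int) ≤ (n.toNat : Int) := by exact_mod_cast h2
    have h4 : (num.toNat : Int) = num := by omega
    have h5 : (n.toNat : Int) = n := by omega
    rw [← h4, ← h5]
    push_cast
    exact_mod_cast h3

theorem pv_loopA_eq (n : Int) (hn : 0 < n) :
    ∀ (fuel : Nat) (num : Int) (h : 1 ≤ num) (acc : List Int),
      fuel = ((Nat.sqrt n.toNat : Int) + 1 - num).toNat →
      pvLoopA n num acc h =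
        acc ++ (PySem.List.pyRange num ((Nat.sqrt n.toNat : Int) + 1) 1).map (fun k => k * k) := by
  intro fuel
  induction fuel with
  | zero =>
    intro num h acc hf
    have hge : (Nat.sqrt n.toNat : Int) + 1 ≤ num := by omega
    rw [pvLoopA]
    have hc : ¬ num * num ≤ n := by
      rw [pv_sq_le_iff n num h hn]; omega
    simp [hc, PySem.List.pyRange_one_eq_nil (by omega : (Nat.sqrt n.toNat : Int) + 1 ≤ num)]
  | succ m ih =>
    intro num h acc hf
    rw [pvLoopA]
    by_cases hc : num * num ≤ n
    · have hlt : num ≤ (Nat.sqrt n.toNat : Int) := (pv_sq_le_iff n num h hn).mp hc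
      rw [dif_pos hc, ih (num + 1) (by omega) _ (by omega)]
      rw [PySem.List.pyRange_one_cons (by omega : num < (Nat.sqrt n.toNat : Int) + 1)]
      simp
    · have hge : ¬ num ≤ (Nat.sqrt n.toNat : Int) := fun hx => hc ((pv_sq_le_iff n num h hn).mpr hx)
      rw [dif_neg hc]
      rw [PySem.List.pyRange_one_eq_nil (by omega : (Nat.sqrt n.toNat : Int) + 1 ≤ num)]
      simp

-- ===== VERDICT (by name: the statement is the Claim_ definition above) =====
theorem get_squares_of_natural_numbers_spec : Claim_equal_get_squares_of_natural_numbers := by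
  intro n _ hpre
  unfold Spec_get_squares_of_natural_numbers get_squares_of_natural_numbers
    get_squares_of_natural_numbers_alt
  rw [pv_loopA_eq n hpre _ 1 (le_refl 1) [] rfl]
  simp
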